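-- pv_equiv track=rewrite | github.com/qiskit-community/qiskit-research | qiskit_research/mzm_generation/utils.py | orbital_permutations
-- ===== SOURCE A (Python) =====
-- import math
-- from typing import (
--     Any,
--     Callable,
--     Dict,
--     FrozenSet,
--     Iterable,
--     Optional,
--     Tuple,
--     Union,
--     cast,
-- )
--
-- def orbital_permutations(n_modes: int) -> Iterable[tuple[int, ...]]:
--     """Orbital permutations used to measure the full correlation matrix."""
--     permutation = list(range(n_modes))
--     for _ in range(math.ceil(n_modes / 2)):
--         yield tuple(permutation)
--         for i in range(0, n_modes - 1, 2):
--             a, b = permutation[i], permutation[i + 1]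
--             permutation[i], permutation[i + 1] = b, a
--         for i in range(1, n_modes - 1, 2):
--             a, b = permutation[i], permutation[i + 1]
--             permutation[i], permutation[i + 1] = b, a
-- ===== SOURCE B (Python) =====
-- def _source_index(n, i):
--     """Index of the element that moves into position i in one
--     even-then-odd adjacent-transposition round."""
--     if i == 0:
--         return 1
--     if i % 2 == 0:
--         return i - 2
--     if i + 2 < n:
--         return i + 2
--     if i + 1 < n:
--         return i + 1
--     return i - 1
--
-- def orbital_permutations(n_modes):
--     """Orbital permutations used to measure the full correlation matrix."""
--     if n_modes < 2:
--         sigma = list(range(n_modes))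
--     else:
--         sigma = [_source_index(n_modes, i) for i in range(n_modes)]
--     permutation = list(range(n_modes))
--     for _ in range((n_modes + 1) // 2):
--         yield tuple(permutation)
--         permutation = [permutation[s] for s in sigma]
-- ===== Notes on version B (the rewrite author's own statement) =====
-- stated objective: alternative
-- what changed: A performs two in-place adjacent-swap sweeps (even then odd indices) on the permutation each round; B precomputes the round's source-index table once in closed form (no swap loops) and produces each next permutation as a single gather/comprehension over that table.
import Mathlib
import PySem

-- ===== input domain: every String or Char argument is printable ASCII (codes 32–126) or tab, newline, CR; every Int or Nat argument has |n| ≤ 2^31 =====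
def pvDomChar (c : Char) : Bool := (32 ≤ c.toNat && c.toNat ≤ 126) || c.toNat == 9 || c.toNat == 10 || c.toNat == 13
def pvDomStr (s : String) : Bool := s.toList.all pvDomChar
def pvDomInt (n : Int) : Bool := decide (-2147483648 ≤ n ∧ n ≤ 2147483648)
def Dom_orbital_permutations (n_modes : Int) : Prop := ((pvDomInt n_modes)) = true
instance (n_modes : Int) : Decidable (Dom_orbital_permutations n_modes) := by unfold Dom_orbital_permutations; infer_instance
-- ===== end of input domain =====

-- B replaces A's per-round in-place even/odd swap sweeps by a closed-form source-index table
-- built once, each round then being a single gather over that table (objective: alternative).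
-- A is a generator; the ports return the list of all yielded tuples.

-- ===== PORT A =====
-- permutation[i], permutation[i+1] = permutation[i+1], permutation[i]  (indices are in range in A's loops)
def pvSwapA (l : List Int) (i : Int) : List Int :=
  let a := PySem.List.pyGetD l i 0
  let b := PySem.List.pyGetD l (i + 1) 0
  PySem.List.pySetD (PySem.List.pySetD l i b) (i + 1) a

-- for i in range(0, n_modes - 1, 2): swap
def pvEvenPass (n : Int) (l : List Int) : List Int :=
  (PySem.List.pyRange 0 (n - 1) 2).foldl pvSwapA l

-- for i in range(1, n_modes - 1, 2): swap
def pvOddPass (n : Int) (l : List Int) : List Int :=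
  (PySem.List.pyRange 1 (n - 1) 2).foldl pvSwapA l

def pvRoundsA (n : Int) : Nat → List Int → List (List Int)
  | 0, _ => []
  | k + 1, perm => perm :: pvRoundsA n k (pvOddPass n (pvEvenPass n perm))

-- math.ceil(n_modes / 2) equals (n_modes + 1) // 2 exactly on integers (|n| ≤ 2^31 keeps the float exact)
def orbital_permutations (n_modes : Int) : List (List Int) :=
  pvRoundsA n_modes (PySem.Int.floordiv (n_modes + 1) 2).toNat
    (PySem.List.pyRange 0 n_modes 1)

-- ===== PORT B =====
def pvSourceIndex (n i : Int) : Int :=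
  if i = 0 then 1
  else if PySem.Int.mod i 2 = 0 then i - 2
  else if i + 2 < n then i + 2
  else if i + 1 < n then i + 1
  else i - 1

def pvSigma (n : Int) : List Int :=
  if n < 2 then PySem.List.pyRange 0 n 1
  else (PySem.List.pyRange 0 n 1).map (fun i => pvSourceIndex n i)

-- [permutation[s] for s in sigma]  (every s is in range)
def pvGather (perm sigma : List Int) : List Int :=
  sigma.map (fun s => PySem.List.pyGetD perm s 0)

def pvRoundsB (sigma : List Int) : Nat → List Int → List (List Int)
  | 0, _ => []
  | k + 1, perm => perm :: pvRoundsB sigma k (pvGather perm sigma)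

def orbital_permutations_alt (n_modes : Int) : List (List Int) :=
  pvRoundsB (pvSigma n_modes) (PySem.Int.floordiv (n_modes + 1) 2).toNat
    (PySem.List.pyRange 0 n_modes 1)

-- ===== PRECONDITION & SPEC =====
def Spec_orbital_permutations (n_modes : Int) (out : List (List Int)) : Prop := out = orbital_permutations_alt n_modes
instance (n_modes : Int) (out : List (List Int)) : Decidable (Spec_orbital_permutations n_modes out) := by unfold Spec_orbital_permutations; infer_instance

-- ===== CLAIM (what is proved, stated in full; the proofs are below) =====
def Claim_equal_orbital_permutations : Prop := ∀ (n_modes : Int), Dom_orbital_permutations n_modes → Spec_orbital_permutations n_modes (orbital_permutations n_modes)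

-- ===== LEMMAS AND PROOFS =====

-- Nat-indexed form of one adjacent swap
def pvSwapN (l : List Int) (i : Nat) : List Int :=
  (l.set i (l.getD (i + 1) 0)).set (i + 1) (l.getD i 0)

-- the even/odd sweeps as folds over Nat counters: indices a, a+2, …, a+2(c-1)
def pvFoldSwap (a c : Nat) (l : List Int) : List Int :=
  (List.range c).foldl (fun l k => pvSwapN l (a + 2 * k)) l

-- where position j reads from, after the sweep at indices a, a+2, …, a+2(c-1)
def pvEIdx (a c j : Nat) : Nat :=
  if a ≤ j ∧ j < a + 2 * c then (if (j - a) % 2 = 0 then j + 1 else j - 1) else j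

theorem pvSwapA_natCast (l : List Int) (m : Nat) : pvSwapA l (m : Int) = pvSwapN l m := by
  unfold pvSwapA pvSwapN
  rw [show (m : Int) + 1 = ((m + 1 : Nat) : Int) from by push_cast; ring]
  simp only [PySem.List.pyGetD_natCast, PySem.List.pySetD_natCast]

theorem pvFold_pyRange_two (a b : Int) (ha : 0 ≤ a) (l : List Int) :
    (PySem.List.pyRange a b 2).foldl pvSwapA l =
      pvFoldSwap a.toNat (if a < b then ((b - a + 1) / 2).toNat else 0) l := by
  rw [PySem.List.pyRange_of_pos a b (by norm_num : (0:Int) < 2), List.foldl_map]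
  have hf : ∀ (l' : List Int) (k : Nat), pvSwapA l' (a + 2 * (k : Int)) = pvSwapN l' (a.toNat + 2 * k) := by
    intro l' k
    rw [show a + 2 * (k : Int) = ((a.toNat + 2 * k : Nat) : Int) from by push_cast; omega]
    exact pvSwapA_natCast _ _
  simp only [hf, show b - a + 2 - 1 = b - a + 1 from by ring]
  rfl

theorem pvSwapN_length (l : List Int) (i : Nat) : (pvSwapN l i).length = l.length := by
  simp [pvSwapN]

theorem pvFoldSwap_length (a c : Nat) (l : List Int) : (pvFoldSwap a c l).length = l.length := by
  induction c generalizing l with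
  | zero => simp [pvFoldSwap]
  | succ c ih =>
      simp only [pvFoldSwap, List.range_succ, List.foldl_append, List.foldl_cons, List.foldl_nil]
      rw [show ((List.range c).foldl (fun l k => pvSwapN l (a + 2 * k)) l) = pvFoldSwap a c l from rfl]
      rw [pvSwapN_length, ih]

theorem pvSwapN_getD (l : List Int) (i : Nat) (hi : i + 1 < l.length) (j : Nat) :
    (pvSwapN l i).getD j 0 =
      if j = i then l.getD (i + 1) 0 else if j = i + 1 then l.getD i 0 else l.getD j 0 := by
  unfold pvSwapN
  simp only [List.getD_eq_getElem?_getD, List.getElem?_set, List.length_set]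
  split_ifs <;> first | rfl | omega

theorem pvFoldSwap_getD (a c : Nat) (l : List Int) (h : a + 2 * c ≤ l.length) (j : Nat) :
    (pvFoldSwap a c l).getD j 0 = l.getD (pvEIdx a c j) 0 := by
  induction c generalizing j with
  | zero =>
      have h0 : ¬(a ≤ j ∧ j < a) := by omega
      simp [pvFoldSwap, pvEIdx, h0]
  | succ c ih =>
      have hstep : pvFoldSwap a (c + 1) l = pvSwapN (pvFoldSwap a c l) (a + 2 * c) := by
        simp [pvFoldSwap, List.range_succ]
      have hlen : (pvFoldSwap a c l).length = l.length := pvFoldSwap_length a c l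
      rw [hstep, pvSwapN_getD _ _ (by omega) j]
      have ihc : a + 2 * c ≤ l.length := by omega
      split_ifs with h1 h2
      · rw [ih ihc (a + 2 * c + 1)]
        have : pvEIdx a c (a + 2 * c + 1) = pvEIdx a (c + 1) j := by
          unfold pvEIdx; split_ifs <;> omega
        rw [this]
      · rw [ih ihc (a + 2 * c)]
        have : pvEIdx a c (a + 2 * c) = pvEIdx a (c + 1) j := by
          unfold pvEIdx; split_ifs <;> omega
        rw [this]
      · rw [ih ihc j]
        have : pvEIdx a c j = pvEIdx a (c + 1) j := by
          unfold pvEIdx; split_ifs <;> omega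
        rw [this]

theorem pvGather_length (perm sigma : List Int) : (pvGather perm sigma).length = sigma.length := by
  simp [pvGather]

theorem pvSigma_length (n : Int) (hn : 0 ≤ n) : ((pvSigma n).length : Int) = n := by
  unfold pvSigma
  split <;> simp [PySem.List.length_pyRange_one] <;> omega

theorem pvIdx_arith (n : Int) (hn : 2 ≤ n) (N c₀ c₁ j : Nat) (hN : (N : Int) = n)
    (hc₀ : (c₀ : Int) = n / 2) (hc₁ : (c₁ : Int) = (n - 1) / 2) (hj : j < N) :
    pvSourceIndex n (j : Int) = ((pvEIdx 0 c₀ (pvEIdx 1 c₁ j) : Nat) : Int) := by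
  have hmod : PySem.Int.mod (j : Int) 2 = (j : Int) % 2 :=
    PySem.Int.mod_eq_emod_of_pos (by norm_num)
  simp only [pvSourceIndex, pvEIdx, hmod]
  split_ifs <;> omega

theorem pvRound_eq (n : Int) (hn : 2 ≤ n) (l : List Int) (hlen : (l.length : Int) = n) :
    pvOddPass n (pvEvenPass n l) = pvGather l (pvSigma n) := by
  have h2 : ¬ n < 2 := by omega
  have hev : pvEvenPass n l = pvFoldSwap 0 ((n / 2).toNat) l := by
    have := pvFold_pyRange_two 0 (n - 1) (le_refl 0) l
    rw [pvEvenPass, this, if_pos (by omega : (0:Int) < n - 1)]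
    norm_num
  have hc₁ : (if (1:Int) < n - 1 then ((n - 1 - 1 + 1) / 2).toNat else 0) = ((n - 1) / 2).toNat := by
    split_ifs with h
    · congr 1; ring_nf
    · omega
  have hod : ∀ l' : List Int, pvOddPass n l' = pvFoldSwap 1 (((n - 1) / 2).toNat) l' := by
    intro l'
    have := pvFold_pyRange_two 1 (n - 1) (by norm_num) l'
    rw [pvOddPass, this, hc₁]
    rfl
  rw [hev, hod]
  have hlev : (pvFoldSwap 0 ((n / 2).toNat) l).length = l.length := pvFoldSwap_length _ _ _
  have hσ : pvSigma n = (PySem.List.pyRange 0 n 1).map (fun i => pvSourceIndex n i) := by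
    rw [pvSigma, if_neg h2]
  have hlenσ : (pvGather l (pvSigma n)).length = l.length := by
    rw [pvGather_length, hσ, List.length_map, PySem.List.length_pyRange_one]
    omega
  apply List.ext_getElem
  · rw [pvFoldSwap_length, hlev, hlenσ]
  · intro j h₁ h₂
    have hjN : j < l.length := by
      rw [pvFoldSwap_length, hlev] at h₁; exact h₁
    -- left side via the pointwise characterisation of the two sweeps
    rw [← List.getD_eq_getElem _ 0 h₁, ← List.getD_eq_getElem _ 0 h₂]
    rw [pvFoldSwap_getD 1 _ _ (by omega) j, pvFoldSwap_getD 0 _ _ (by omega) _]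
    -- right side: the gather over the closed-form table
    have hjσ : j < (pvSigma n).length := by
      rw [hσ, List.length_map, PySem.List.length_pyRange_one]; omega
    have hjr : j < (PySem.List.pyRange 0 n 1).length := by
      rw [PySem.List.length_pyRange_one]; omega
    have hrhs : (pvGather l (pvSigma n)).getD j 0 = PySem.List.pyGetD l (pvSourceIndex n (j : Int)) 0 := by
      rw [List.getD_eq_getElem _ 0 h₂]
      unfold pvGather
      simp only [hσ, List.getElem_map, PySem.List.getElem_pyRange_one]
      norm_num
    rw [hrhs, pvIdx_arith n hn l.length ((n / 2).toNat) (((n - 1) / 2).toNat) j hlen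
      (by omega) (by omega) hjN]
    rw [PySem.List.pyGetD_natCast]

theorem pvRounds_eq (n : Int) (hn : 2 ≤ n) :
    ∀ (k : Nat) (l : List Int), (l.length : Int) = n →
      pvRoundsA n k l = pvRoundsB (pvSigma n) k l := by
  intro k
  induction k with
  | zero => intro l _; rfl
  | succ k ih =>
      intro l hlen
      have hr := pvRound_eq n hn l hlen
      have hlen' : ((pvGather l (pvSigma n)).length : Int) = n := by
        rw [pvGather_length, pvSigma_length n (by omega)]
      simp only [pvRoundsA, pvRoundsB, hr]
      rw [ih _ hlen']

-- ===== VERDICT (by name: the statement is the Claim_ definition above) =====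
theorem orbital_permutations_spec : Claim_equal_orbital_permutations := by
  intro n _
  unfold Spec_orbital_permutations orbital_permutations orbital_permutations_alt
  by_cases hn : 2 ≤ n
  · exact pvRounds_eq n hn _ _ (by rw [PySem.List.length_pyRange_one]; omega)
  · -- fewer than two modes: at most one round, which yields the initial permutation in both ports
    have hf : PySem.Int.floordiv (n + 1) 2 = (n + 1) / 2 :=
      PySem.Int.floordiv_eq_ediv_of_pos (by norm_num)
    have hle : (PySem.Int.floordiv (n + 1) 2).toNat ≤ 1 := by rw [hf]; omega
    rcases Nat.le_one_iff_eq_zero_or_eq_one.mp hle with h | h <;> rw [h] <;> rfl
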